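-- pv_equiv track=rewrite | github.com/cribbslab/TallyTriN | tallytrin/python/correct_10xbarcode.py | closest_match
-- ===== SOURCE A (Python) =====
-- def closest_match(input_string, string_list):
--     closest_match = None
--     min_distance = float('inf')
--
--     for candidate in string_list:
--         distance = sum(ch1 != ch2 for ch1, ch2 in zip(input_string, candidate))
--         if distance <= 2 and distance < min_distance:
--             closest_match = candidate
--             min_distance = distance
--     return closest_match
-- ===== SOURCE B (Python) =====
-- def closest_match(input_string, string_list):
--     scored = sorted(
--         ((sum(ch1 != ch2 for ch1, ch2 in zip(input_string, candidate)), candidate)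
--          for candidate in string_list),
--         key=lambda pair: pair[0],
--     )
--     if scored and scored[0][0] <= 2:
--         return scored[0][1]
--     return None
-- ===== Notes on version B (the rewrite author's own statement) =====
-- stated objective: alternative
-- what changed: Replaces the in-place min-tracking loop with a materialize-score-sort pipeline: build (distance, candidate) pairs, stably sort by distance, and pick the head if its distance is at most 2.
import Mathlib
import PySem

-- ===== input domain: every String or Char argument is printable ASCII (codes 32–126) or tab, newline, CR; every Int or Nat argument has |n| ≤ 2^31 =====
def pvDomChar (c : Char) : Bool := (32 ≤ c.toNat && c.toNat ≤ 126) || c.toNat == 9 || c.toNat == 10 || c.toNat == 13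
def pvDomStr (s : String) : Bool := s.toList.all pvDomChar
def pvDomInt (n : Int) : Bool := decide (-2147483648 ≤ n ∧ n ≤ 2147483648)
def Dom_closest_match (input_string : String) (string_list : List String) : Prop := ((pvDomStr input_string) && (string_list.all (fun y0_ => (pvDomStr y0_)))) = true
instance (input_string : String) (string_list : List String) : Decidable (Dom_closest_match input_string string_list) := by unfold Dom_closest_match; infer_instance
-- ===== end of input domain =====

-- B replaces A's in-place min-tracking loop with a score/stable-sort/pick-head pipeline (alternative decomposition, same results).
-- sum(ch1 != ch2 for ch1, ch2 in zip(s, c)) : zip truncates to the shorter string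
def pvHamming (s c : String) : Int :=
  ((s.toList.zip c.toList).map (fun p => if p.1 ≠ p.2 then (1 : Int) else 0)).sum

-- ===== PORT A =====
-- state = (closest_match, min_distance); min_distance = none models float('inf')
def closest_match (input_string : String) (string_list : List String) : Option String :=
  (string_list.foldl
    (fun st candidate =>
      let distance := pvHamming input_string candidate
      match st.2 with
      | none => if distance ≤ 2 then (some candidate, some distance) else st
      | some m => if distance ≤ 2 ∧ distance < m then (some candidate, some distance) else st)
    ((none, none) : Option String × Option Int)).1

-- ===== PORT B =====
def closest_match_alt (input_string : String) (string_list : List String) : Option String :=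
  let scored :=
    PySem.List.sorted (string_list.map (fun candidate => (pvHamming input_string candidate, candidate)))
      (fun pair => pair.1) false
  match scored with
  | [] => none
  | p :: _ => if p.1 ≤ 2 then some p.2 else none

-- ===== PRECONDITION & SPEC =====
def Spec_closest_match (input_string : String) (string_list : List String) (out : Option String) : Prop := out = closest_match_alt input_string string_list
instance (input_string : String) (string_list : List String) (out : Option String) : Decidable (Spec_closest_match input_string string_list out) := by unfold Spec_closest_match; infer_instance

-- ===== CLAIM (what is proved, stated in full; the proofs are below) =====
def Claim_equal_closest_match : Prop := ∀ (input_string : String) (string_list : List String), Dom_closest_match input_string string_list → Spec_closest_match input_string string_list (closest_match input_string string_list)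

-- ===== LEMMAS AND PROOFS =====

-- A's loop step, named for the proofs (definitionally the lambda inside closest_match)
def pvStepA (s : String) (st : Option String × Option Int) (candidate : String) :
    Option String × Option Int :=
  let distance := pvHamming s candidate
  match st.2 with
  | none => if distance ≤ 2 then (some candidate, some distance) else st
  | some m => if distance ≤ 2 ∧ distance < m then (some candidate, some distance) else st

-- the full loop state A ends with, read off the head of the sorted scored list
def pvHeadPick : List (Int × String) → Option String × Option Int
  | [] => (none, none)
  | (d, c) :: _ => if d ≤ 2 then (some c, some d) else (none, none)

lemma pv_sorted_snoc (xs : List (Int × String)) (x : Int × String) :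
    PySem.List.sorted (xs ++ [x]) (fun p => p.1) false
      = PySem.List.insertBy (fun a b => decide (a.1 < b.1)) x
          (PySem.List.sorted xs (fun p => p.1) false) := by
  rw [PySem.List.sorted_eq_foldl_insertBy, PySem.List.sorted_eq_foldl_insertBy, List.foldl_append]
  rfl

lemma pv_fold_eq_headPick (s : String) (l : List String) :
    l.foldl (pvStepA s) ((none, none) : Option String × Option Int)
      = pvHeadPick (PySem.List.sorted (l.map (fun c => (pvHamming s c, c))) (fun p => p.1) false) := by
  induction l using List.reverseRecOn with
  | nil => rfl
  | append_singleton l x ih =>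
      rw [List.foldl_append, List.map_append, List.map_singleton, pv_sorted_snoc, ih]
      cases h : PySem.List.sorted (l.map (fun c => (pvHamming s c, c))) (fun p => p.1) false with
      | nil =>
          simp only [PySem.List.insertBy, pvHeadPick, List.foldl_cons, List.foldl_nil, pvStepA]
      | cons p t =>
          obtain ⟨d, c⟩ := p
          simp only [PySem.List.insertBy, pvHeadPick, List.foldl_cons, List.foldl_nil, pvStepA]
          by_cases hlt : pvHamming s x < d
          · simp only [hlt, decide_true, if_true]
            by_cases hd : d ≤ 2
            · have hx : pvHamming s x ≤ 2 := by omega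
              simp [hd, hx, hlt]
            · by_cases hx : pvHamming s x ≤ 2 <;> simp [hd, hx]
          · simp only [hlt, decide_false]
            by_cases hd : d ≤ 2
            · have hno : ¬ (pvHamming s x ≤ 2 ∧ pvHamming s x < d) := by omega
              simp [hd, hno]
            · have hx : ¬ pvHamming s x ≤ 2 := by omega
              simp [hd, hx]

lemma pv_alt_eq (s : String) (l : List String) :
    closest_match_alt s l
      = (pvHeadPick (PySem.List.sorted (l.map (fun c => (pvHamming s c, c))) (fun p => p.1) false)).1 := by
  unfold closest_match_alt
  cases h : PySem.List.sorted (l.map (fun c => (pvHamming s c, c))) (fun p => p.1) false with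
  | nil => simp [pvHeadPick]
  | cons p t =>
      obtain ⟨d, c⟩ := p
      by_cases hd : d ≤ 2 <;> simp [pvHeadPick, hd]

-- ===== VERDICT (by name: the statement is the Claim_ definition above) =====
theorem closest_match_spec : Claim_equal_closest_match := by
  intro s l _
  show closest_match s l = closest_match_alt s l
  unfold closest_match
  rw [show (fun (st : Option String × Option Int) candidate =>
        let distance := pvHamming s candidate
        match st.2 with
        | none => if distance ≤ 2 then (some candidate, some distance) else st
        | some m => if distance ≤ 2 ∧ distance < m then (some candidate, some distance) else st)
      = pvStepA s from rfl, pv_fold_eq_headPick, pv_alt_eq]
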